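-- pv_equiv track=rewrite | github.com/lastjung/lotto | api/main.py | analyze_numbers
-- ===== SOURCE A (Python) =====
-- def analyze_numbers(numbers: list) -> dict:
--     """번호 분석"""
--     return {
--         "sum": sum(numbers),
--         "odd_count": sum(1 for n in numbers if n % 2 == 1),
--         "even_count": sum(1 for n in numbers if n % 2 == 0),
--         "low_count": sum(1 for n in numbers if n <= 22),
--         "high_count": sum(1 for n in numbers if n > 22),
--     }
-- ===== SOURCE B (Python) =====
-- def analyze_numbers(numbers: list) -> dict:
--     """번호 분석 (single pass)"""
--     total = 0
--     odd = 0
--     even = 0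
--     low = 0
--     high = 0
--     for n in numbers:
--         total += n
--         if n % 2 == 1:
--             odd += 1
--         elif n % 2 == 0:
--             even += 1
--         if n <= 22:
--             low += 1
--         else:
--             high += 1
--     return {
--         "sum": total,
--         "odd_count": odd,
--         "even_count": even,
--         "low_count": low,
--         "high_count": high,
--     }
-- ===== Notes on version B (the rewrite author's own statement) =====
-- stated objective: alternative
-- what changed: Replaced five separate passes (sum plus four filtered generator sums) by a single loop maintaining five accumulators.
import Mathlib
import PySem

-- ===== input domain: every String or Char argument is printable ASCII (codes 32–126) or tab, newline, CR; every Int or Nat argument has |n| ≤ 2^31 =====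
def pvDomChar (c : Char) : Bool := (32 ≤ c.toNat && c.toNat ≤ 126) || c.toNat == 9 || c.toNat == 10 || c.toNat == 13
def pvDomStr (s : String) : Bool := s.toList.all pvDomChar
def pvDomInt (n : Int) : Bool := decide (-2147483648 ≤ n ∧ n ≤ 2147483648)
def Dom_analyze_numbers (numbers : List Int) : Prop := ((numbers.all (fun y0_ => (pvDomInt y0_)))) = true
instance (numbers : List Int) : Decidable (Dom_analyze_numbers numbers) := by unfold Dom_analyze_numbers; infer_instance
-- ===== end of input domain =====

-- B replaces A's five separate passes over the list by a single loop with five accumulators (same result).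

-- ===== PORT A =====
-- A: five independent passes — sum, and four filtered counts (generator sums of 1).
def analyze_numbers (numbers : List Int) : List (String × Int) :=
  [("sum", numbers.foldl (fun acc n => acc + n) 0),
   ("odd_count", numbers.foldl (fun acc n => if PySem.Int.mod n 2 = 1 then acc + 1 else acc) 0),
   ("even_count", numbers.foldl (fun acc n => if PySem.Int.mod n 2 = 0 then acc + 1 else acc) 0),
   ("low_count", numbers.foldl (fun acc n => if n ≤ 22 then acc + 1 else acc) 0),
   ("high_count", numbers.foldl (fun acc n => if n > 22 then acc + 1 else acc) 0)]

-- ===== PORT B =====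
-- B: one pass maintaining (total, odd, even, low, high); pvStepB is the loop body.
def pvStepB (st : Int × Int × Int × Int × Int) (n : Int) : Int × Int × Int × Int × Int :=
  let t := st.1 + n
  let o := st.2.1; let e := st.2.2.1
  let (o, e) :=
    if PySem.Int.mod n 2 = 1 then (o + 1, e)
    else if PySem.Int.mod n 2 = 0 then (o, e + 1)
    else (o, e)
  let (l, h) := if n ≤ 22 then (st.2.2.2.1 + 1, st.2.2.2.2) else (st.2.2.2.1, st.2.2.2.2 + 1)
  (t, o, e, l, h)

def analyze_numbers_alt (numbers : List Int) : List (String × Int) :=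
  let st := numbers.foldl pvStepB (0, 0, 0, 0, 0)
  [("sum", st.1), ("odd_count", st.2.1), ("even_count", st.2.2.1),
   ("low_count", st.2.2.2.1), ("high_count", st.2.2.2.2)]

-- ===== PRECONDITION & SPEC =====
def Spec_analyze_numbers (numbers : List Int) (out : List (String × Int)) : Prop := out = analyze_numbers_alt numbers
instance (numbers : List Int) (out : List (String × Int)) : Decidable (Spec_analyze_numbers numbers out) := by unfold Spec_analyze_numbers; infer_instance

-- ===== CLAIM (what is proved, stated in full; the proofs are below) =====
def Claim_equal_analyze_numbers : Prop := ∀ (numbers : List Int), Dom_analyze_numbers numbers → Spec_analyze_numbers numbers (analyze_numbers numbers)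

-- ===== LEMMAS AND PROOFS =====

theorem pv_sum_shift (xs : List Int) (a : Int) :
    xs.foldl (fun acc n => acc + n) a = a + xs.foldl (fun acc n => acc + n) 0 := by
  induction xs generalizing a with
  | nil => simp
  | cons x xs ih => simp only [List.foldl]; rw [ih, ih (0 + x)]; ring

theorem pv_count_shift (p : Int → Prop) [DecidablePred p] (xs : List Int) (a : Int) :
    xs.foldl (fun acc n => if p n then acc + 1 else acc) a
      = a + xs.foldl (fun acc n => if p n then acc + 1 else acc) 0 := by
  induction xs generalizing a with
  | nil => simp
  | cons x xs ih =>
    simp only [List.foldl]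
    rw [ih, ih (if p x then (0 : Int) + 1 else 0)]
    by_cases h : p x <;> simp [h] <;> ring

theorem pvStepB_1 (st : Int × Int × Int × Int × Int) (n : Int) :
    (pvStepB st n).1 = st.1 + n := by
  by_cases h1 : PySem.Int.mod n 2 = 1 <;> by_cases h0 : PySem.Int.mod n 2 = 0 <;>
    by_cases hl : n ≤ 22 <;>
      simp only [pvStepB, h1, h0, hl, if_true, if_false] <;> try simp

theorem pvStepB_2 (st : Int × Int × Int × Int × Int) (n : Int) :
    (pvStepB st n).2.1 = if PySem.Int.mod n 2 = 1 then st.2.1 + 1 else st.2.1 := by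
  by_cases h1 : PySem.Int.mod n 2 = 1 <;> by_cases h0 : PySem.Int.mod n 2 = 0 <;>
    by_cases hl : n ≤ 22 <;>
      simp only [pvStepB, h1, h0, hl, if_true, if_false] <;> try simp

theorem pvStepB_3 (st : Int × Int × Int × Int × Int) (n : Int) :
    (pvStepB st n).2.2.1 = if PySem.Int.mod n 2 = 1 then st.2.2.1
      else if PySem.Int.mod n 2 = 0 then st.2.2.1 + 1 else st.2.2.1 := by
  by_cases h1 : PySem.Int.mod n 2 = 1 <;> by_cases h0 : PySem.Int.mod n 2 = 0 <;>
    by_cases hl : n ≤ 22 <;>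
      simp only [pvStepB, h1, h0, hl, if_true, if_false] <;> try simp

theorem pvStepB_4 (st : Int × Int × Int × Int × Int) (n : Int) :
    (pvStepB st n).2.2.2.1 = if n ≤ 22 then st.2.2.2.1 + 1 else st.2.2.2.1 := by
  by_cases h1 : PySem.Int.mod n 2 = 1 <;> by_cases h0 : PySem.Int.mod n 2 = 0 <;>
    by_cases hl : n ≤ 22 <;>
      simp only [pvStepB, h1, h0, hl, if_true, if_false] <;> try simp

theorem pvStepB_5 (st : Int × Int × Int × Int × Int) (n : Int) :
    (pvStepB st n).2.2.2.2 = if n ≤ 22 then st.2.2.2.2 else st.2.2.2.2 + 1 := by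
  by_cases h1 : PySem.Int.mod n 2 = 1 <;> by_cases h0 : PySem.Int.mod n 2 = 0 <;>
    by_cases hl : n ≤ 22 <;>
      simp only [pvStepB, h1, h0, hl, if_true, if_false] <;> try simp

theorem pv_fold_1 (xs : List Int) (st : Int × Int × Int × Int × Int) :
    (xs.foldl pvStepB st).1 = st.1 + xs.foldl (fun acc n => acc + n) 0 := by
  induction xs generalizing st with
  | nil => simp
  | cons x xs ih =>
    simp only [List.foldl]
    rw [ih, pvStepB_1, pv_sum_shift xs (0 + x)]
    ring

theorem pv_fold_2 (xs : List Int) (st : Int × Int × Int × Int × Int) :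
    (xs.foldl pvStepB st).2.1
      = st.2.1 + xs.foldl (fun acc n => if PySem.Int.mod n 2 = 1 then acc + 1 else acc) 0 := by
  induction xs generalizing st with
  | nil => simp
  | cons x xs ih =>
    simp only [List.foldl]
    rw [ih, pvStepB_2]
    by_cases h : PySem.Int.mod x 2 = 1
    · rw [if_pos h, if_pos h, pv_count_shift (fun n => PySem.Int.mod n 2 = 1) xs ((0 : Int) + 1)]
      ring
    · rw [if_neg h, if_neg h]

theorem pv_fold_3 (xs : List Int) (st : Int × Int × Int × Int × Int) :
    (xs.foldl pvStepB st).2.2.1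
      = st.2.2.1 + xs.foldl (fun acc n => if PySem.Int.mod n 2 = 0 then acc + 1 else acc) 0 := by
  induction xs generalizing st with
  | nil => simp
  | cons x xs ih =>
    simp only [List.foldl]
    rw [ih, pvStepB_3]
    by_cases h1 : PySem.Int.mod x 2 = 1
    · have h0 : ¬ PySem.Int.mod x 2 = 0 := by rw [h1]; decide
      rw [if_pos h1, if_neg h0]
    · rw [if_neg h1]
      by_cases h0 : PySem.Int.mod x 2 = 0
      · rw [if_pos h0, if_pos h0,
          pv_count_shift (fun n => PySem.Int.mod n 2 = 0) xs ((0 : Int) + 1)]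
        ring
      · rw [if_neg h0, if_neg h0]

theorem pv_fold_4 (xs : List Int) (st : Int × Int × Int × Int × Int) :
    (xs.foldl pvStepB st).2.2.2.1
      = st.2.2.2.1 + xs.foldl (fun acc n => if n ≤ 22 then acc + 1 else acc) 0 := by
  induction xs generalizing st with
  | nil => simp
  | cons x xs ih =>
    simp only [List.foldl]
    rw [ih, pvStepB_4]
    by_cases h : x ≤ 22
    · rw [if_pos h, if_pos h, pv_count_shift (fun n => n ≤ 22) xs ((0 : Int) + 1)]
      ring
    · rw [if_neg h, if_neg h]

theorem pv_fold_5 (xs : List Int) (st : Int × Int × Int × Int × Int) :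
    (xs.foldl pvStepB st).2.2.2.2
      = st.2.2.2.2 + xs.foldl (fun acc n => if n > 22 then acc + 1 else acc) 0 := by
  induction xs generalizing st with
  | nil => simp
  | cons x xs ih =>
    simp only [List.foldl]
    rw [ih, pvStepB_5]
    by_cases h : x ≤ 22
    · rw [if_pos h, if_neg (not_lt.mpr h)]
    · rw [if_neg h, if_pos (not_le.mp h),
        pv_count_shift (fun n => n > 22) xs ((0 : Int) + 1)]
      ring

-- ===== VERDICT (by name: the statement is the Claim_ definition above) =====
theorem analyze_numbers_spec : Claim_equal_analyze_numbers := by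
  intro numbers _
  unfold Spec_analyze_numbers analyze_numbers analyze_numbers_alt
  simp only [pv_fold_1, pv_fold_2, pv_fold_3, pv_fold_4, pv_fold_5, zero_add]
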